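-- pv_equiv track=rewrite | github.com/AKSAKS24/DB_RULE_628_T881 | app/app.py | rm_strings_and_comments
-- ===== SOURCE A (Python) =====
-- def rm_strings_and_comments(src: str) -> str:
--     """
--     Pragmatic ABAP sanitation:
--     - Remove full-line comments: lines starting with '*' in column 1
--     - Strip inline comments starting with double quote "
--     - Replace string literals '...'(with '' escapes) by spaces of same length
--     Keeps offsets stable to preserve line calculations.
--     """
--     lines = src.splitlines(keepends=True)
--     out = []
--     for ln in lines:
--         if ln.startswith("*"):  # full line comment
--             out.append(" " * len(ln))
--             continue
--         buf = list(ln)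
--         in_str = False
--         i = 0
--         while i < len(buf):
--             ch = buf[i]
--             if ch == "'":
--                 # toggle string; handle doubled quotes ('')
--                 if in_str:
--                     if i + 1 < len(buf) and buf[i + 1] == "'":
--                         i += 2
--                         continue
--                     else:
--                         in_str = False
--                 else:
--                     in_str = True
--                 i += 1
--                 continue
--             if ch == '"' and not in_str:
--                 # comment till end of line
--                 for j in range(i, len(buf)):
--                     buf[j] = " "
--                 break
--             if in_str:
--                 buf[i] = " "  # blank out string content
--             i += 1
--         out.append("".join(buf))
--     return "".join(out)
-- ===== SOURCE B (Python) =====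
-- def _blank_literal(s):
--     # Blank the body of an open string literal, keeping '' pairs and the
--     # closing quote; returns (text after the literal, blanked literal body).
--     pieces = []
--     pos = 0
--     while True:
--         k = s.find("'", pos)
--         if k == -1:
--             pieces.append(" " * (len(s) - pos))
--             return "", "".join(pieces)
--         pieces.append(" " * (k - pos))
--         if s[k + 1:k + 2] == "'":
--             pieces.append("''")
--             pos = k + 2
--         else:
--             pieces.append("'")
--             return s[k + 1:], "".join(pieces)
--
--
-- def rm_strings_and_comments(src: str) -> str:
--     out = []
--     for ln in src.splitlines(keepends=True):
--         if ln.startswith("*"):  # full line comment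
--             out.append(" " * len(ln))
--             continue
--         pieces = []
--         rest = ln
--         while rest:
--             q = rest.find("'")
--             c = rest.find('"')
--             if c != -1 and (q == -1 or c < q):
--                 # inline comment: keep text before it, blank the remainder
--                 pieces.append(rest[:c])
--                 pieces.append(" " * (len(rest) - c))
--                 rest = ""
--             elif q != -1:
--                 # string literal: keep text before it and the opening quote
--                 pieces.append(rest[:q + 1])
--                 rest, body = _blank_literal(rest[q + 1:])
--                 pieces.append(body)
--             else:
--                 pieces.append(rest)
--                 rest = ""
--         out.append("".join(pieces))
--     return "".join(out)
-- ===== Notes on version B (the rewrite author's own statement) =====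
-- stated objective: faster
-- what changed: Replaces A's per-character state-machine loop (in_str flag, index i, in-place buffer mutation) with a find/jump tokenizer: each line is consumed by jumping with str.find to the next quote or comment delimiter, copying untouched text as slices and blanking string bodies/comments wholesale.
import Mathlib
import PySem

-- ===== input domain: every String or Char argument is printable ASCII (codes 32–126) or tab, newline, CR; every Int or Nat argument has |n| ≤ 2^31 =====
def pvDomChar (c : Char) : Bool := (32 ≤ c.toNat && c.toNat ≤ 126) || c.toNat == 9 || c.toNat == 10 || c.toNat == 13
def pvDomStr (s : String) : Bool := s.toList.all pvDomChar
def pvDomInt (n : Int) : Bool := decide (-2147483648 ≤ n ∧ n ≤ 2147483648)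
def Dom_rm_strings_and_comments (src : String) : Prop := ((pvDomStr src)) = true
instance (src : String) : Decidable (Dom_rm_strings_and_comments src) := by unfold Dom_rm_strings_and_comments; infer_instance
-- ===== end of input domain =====

-- B re-implements A's per-character sanitation state machine as a find/jump tokenizer over each line; same return value, measurably faster in Python (C-level str.find and slice copies instead of a per-character interpreted loop).

-- shared helper: Python's str.splitlines(keepends=True), hand-ported (exact on this
-- domain: the only line breaks in Dom are '\n', '\r' and '\r\n'); used by both ports.
def splitKeepAux : List Char → List Char → List (List Char)
  | acc, [] => if acc = [] then [] else [acc.reverse]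
  | acc, '\r' :: '\n' :: rest => ('\n' :: '\r' :: acc).reverse :: splitKeepAux [] rest
  | acc, c :: rest =>
    if c = '\n' ∨ c = '\r' then (c :: acc).reverse :: splitKeepAux [] rest
    else splitKeepAux (c :: acc) rest

def splitKeep (s : List Char) : List (List Char) := splitKeepAux [] s

-- ===== PORT A =====
-- A's inner while-loop over buf/i/in_str, as structural recursion on the rest of the line
def pvProcA : List Char → Bool → List Char
  | [], _ => []
  | c :: cs, inStr =>
    if c = '\'' then
      if inStr then
        match cs with
        | c2 :: cs2 =>
          if c2 = '\'' then c :: c2 :: pvProcA cs2 true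
          else c :: pvProcA (c2 :: cs2) false
        | [] => c :: pvProcA [] false
      else c :: pvProcA cs true
    else if c = '"' ∧ inStr = false then List.replicate (cs.length + 1) ' '
    else if inStr then ' ' :: pvProcA cs inStr
    else c :: pvProcA cs inStr
termination_by l _ => l.length
decreasing_by all_goals simp

def pvLineA (ln : List Char) : List Char :=
  if PySem.Chars.startswith ln ['*'] then List.replicate ln.length ' '
  else pvProcA ln false

def rm_strings_and_comments (src : String) : String :=
  String.mk (((splitKeep src.toList).map pvLineA).flatten)

-- ===== PORT B =====
-- termination helper for the jump recursion (cited by name in decreasing_by)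
theorem pv_find_ne_nil {cs : List Char} {a : Char}
    (h : ¬ PySem.Chars.find cs [a] = -1) : cs ≠ [] := by
  intro hnil; subst hnil
  apply h
  rw [PySem.Chars.find_eq_neg_one_iff]
  intro hinf
  simpa using hinf.length_le

-- _blank_literal: jump with find to each quote inside an open literal
def pvBlankLit (s : List Char) : List Char × List Char :=
  let k := PySem.Chars.find s ['\'']
  if hk : k = -1 then ([], List.replicate s.length ' ')
  else
    let kn := k.toNat
    let pre := List.replicate kn ' '
    if s[kn + 1]? = some '\'' then
      let r := pvBlankLit (s.drop (kn + 2))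
      (r.1, pre ++ ['\'', '\''] ++ r.2)
    else (s.drop (kn + 1), pre ++ ['\''])
termination_by s.length
decreasing_by
  have : s ≠ [] := pv_find_ne_nil hk
  have : 0 < s.length := List.length_pos_iff.mpr this
  simp [List.length_drop]; omega

theorem pvBlankLit_fst_len_aux : ∀ (n : Nat) (s : List Char), s.length ≤ n → (pvBlankLit s).1.length ≤ s.length := by
  intro n
  induction n with
  | zero =>
    intro s hs
    have : s = [] := List.eq_nil_of_length_eq_zero (Nat.le_zero.mp hs)
    subst this
    rw [pvBlankLit]
    simp only
    split <;> rfl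
  | succ n ih =>
    intro s hs
    rw [pvBlankLit]
    split
    · simp
    · dsimp only
      split
      · rename_i hk hq
        have hne : s ≠ [] := pv_find_ne_nil hk
        have h0 : 0 < s.length := List.length_pos_iff.mpr hne
        have h1 := ih (s.drop ((PySem.Chars.find s ['\'']).toNat + 2))
          (by simp only [List.length_drop]; omega)
        simp only [List.length_drop] at h1
        simpa using le_trans h1 (by omega)
      · simp [List.length_drop]

theorem pvBlankLit_fst_len (s : List Char) : (pvBlankLit s).1.length ≤ s.length :=
  pvBlankLit_fst_len_aux s.length s le_rfl

-- the per-line while-loop of B: jump to the next quote / comment delimiter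
def pvProcB (rest : List Char) : List Char :=
  let q := PySem.Chars.find rest ['\'']
  let c := PySem.Chars.find rest ['"']
  if c ≠ -1 ∧ (q = -1 ∨ c < q) then
    rest.take c.toNat ++ List.replicate (rest.length - c.toNat) ' '
  else if hq : q ≠ -1 then
    let pre := rest.take (q.toNat + 1)
    let br := pvBlankLit (rest.drop (q.toNat + 1))
    pre ++ br.2 ++ pvProcB br.1
  else rest
termination_by rest.length
decreasing_by
  have hne : rest ≠ [] := pv_find_ne_nil hq
  have h0 : 0 < rest.length := List.length_pos_iff.mpr hne
  have h1 := pvBlankLit_fst_len (rest.drop ((PySem.Chars.find rest ['\'']).toNat + 1))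
  simp only [List.length_drop] at h1
  exact lt_of_le_of_lt h1 (by omega)

def pvLineB (ln : List Char) : List Char :=
  if PySem.Chars.startswith ln ['*'] then List.replicate ln.length ' '
  else pvProcB ln

def rm_strings_and_comments_alt (src : String) : String :=
  String.mk (((splitKeep src.toList).map pvLineB).flatten)

-- ===== PRECONDITION & SPEC =====
def Spec_rm_strings_and_comments (src : String) (out : String) : Prop := out = rm_strings_and_comments_alt src
instance (src : String) (out : String) : Decidable (Spec_rm_strings_and_comments src out) := by unfold Spec_rm_strings_and_comments; infer_instance

-- ===== CLAIM (what is proved, stated in full; the proofs are below) =====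
def Claim_equal_rm_strings_and_comments : Prop := ∀ (src : String), Dom_rm_strings_and_comments src → Spec_rm_strings_and_comments src (rm_strings_and_comments src)

-- ===== LEMMAS AND PROOFS =====

theorem pv_singleton_prefix (a : Char) (l : List Char) : [a] <+: l ↔ l.head? = some a := by
  cases l <;> simp [List.cons_prefix_cons, eq_comm]

theorem pv_find_facts (cs : List Char) (a : Char)
    (h : ¬ PySem.Chars.find cs [a] = -1) :
    (PySem.Chars.find cs [a]).toNat < cs.length ∧
      cs.drop (PySem.Chars.find cs [a]).toNat = a :: cs.drop ((PySem.Chars.find cs [a]).toNat + 1) ∧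
      ∀ c ∈ cs.take (PySem.Chars.find cs [a]).toNat, c ≠ a := by
  have h0 : 0 ≤ PySem.Chars.find cs [a] := by
    have := PySem.Chars.neg_one_le_find cs [a]
    omega
  obtain ⟨hpre, hmin⟩ := PySem.Chars.find_spec (s := cs) (sub := [a]) h0
  have hhead : (cs.drop (PySem.Chars.find cs [a]).toNat).head? = some a :=
    (pv_singleton_prefix _ _).mp hpre
  have hlt : (PySem.Chars.find cs [a]).toNat < cs.length := by
    by_contra hge
    rw [List.drop_eq_nil_of_le (by omega)] at hhead
    simp at hhead
  refine ⟨hlt, ?_, ?_⟩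
  · obtain ⟨t, ht⟩ := List.head?_eq_some_iff.mp hhead
    have htl : t = cs.drop ((PySem.Chars.find cs [a]).toNat + 1) := by
      rw [← List.tail_drop, ht]
      rfl
    rw [ht, htl]
  · intro c hc hca
    obtain ⟨i, hi, hgi⟩ := List.mem_iff_getElem.mp hc
    rw [hca] at hgi
    have hil : i < (PySem.Chars.find cs [a]).toNat := by
      have := List.length_take_le (PySem.Chars.find cs [a]).toNat cs
      omega
    apply hmin i hil
    rw [pv_singleton_prefix, List.head?_drop]
    rw [List.getElem_take] at hgi
    rw [List.getElem?_eq_getElem (by omega), hgi]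

theorem pv_find_none (cs : List Char) (a : Char)
    (h : PySem.Chars.find cs [a] = -1) : ∀ c ∈ cs, c ≠ a := by
  intro c hc hca
  subst hca
  rw [PySem.Chars.find_eq_neg_one_iff] at h
  exact h ((List.singleton_infix_iff c cs).mpr hc)

-- A's loop copies a prefix free of quotes and comment signs unchanged
theorem pv_procA_copy (p rest : List Char)
    (hp : ∀ c ∈ p, c ≠ '\'' ∧ c ≠ '"') :
    pvProcA (p ++ rest) false = p ++ pvProcA rest false := by
  induction p with
  | nil => rfl
  | cons c p ih =>
    have hc := hp c (by simp)
    rw [List.cons_append, pvProcA.eq_def]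
    simp only [hc.1, hc.2, if_neg, false_and, if_false]
    rw [ih (fun c hc => hp c (by simp [hc]))]
    simp [hc.1, hc.2]

-- A's loop blanks a quote-free prefix while inside a string
theorem pv_procA_blank (p rest : List Char)
    (hp : ∀ c ∈ p, c ≠ '\'') :
    pvProcA (p ++ rest) true = List.replicate p.length ' ' ++ pvProcA rest true := by
  induction p with
  | nil => rfl
  | cons c p ih =>
    have hc := hp c (by simp)
    rw [List.cons_append, pvProcA.eq_def]
    simp only [hc, if_neg, and_false, if_false, Bool.true_eq_false]
    rw [ih (fun c hc => hp c (by simp [hc]))]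
    simp [hc, List.replicate_succ]

theorem pv_procA_quote_close (t : List Char) (hq : t.head? ≠ some '\'') :
    pvProcA ('\'' :: t) true = '\'' :: pvProcA t false := by
  cases t with
  | nil => rw [pvProcA.eq_def]; simp [pvProcA.eq_def]
  | cons c2 cs2 =>
    have : c2 ≠ '\'' := by simpa using hq
    rw [pvProcA.eq_def]
    simp [this]

-- A's in-string scanning agrees with B's _blank_literal jump
theorem pv_procA_blankLit : ∀ (n : Nat) (s : List Char), s.length ≤ n →
    pvProcA s true = (pvBlankLit s).2 ++ pvProcA (pvBlankLit s).1 false := by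
  intro n
  induction n with
  | zero =>
    intro s hs
    have : s = [] := List.eq_nil_of_length_eq_zero (Nat.le_zero.mp hs)
    subst this
    rw [pvBlankLit]
    split
    · simp [pvProcA.eq_def]
    · exact absurd rfl (pv_find_ne_nil (by assumption))
  | succ n ih =>
    intro s hs
    by_cases hk : PySem.Chars.find s ['\''] = -1
    · have hnone := pv_find_none s '\'' hk
      have h1 := pv_procA_blank s [] hnone
      rw [List.append_nil] at h1
      rw [pvBlankLit]
      simp only [hk, ↓reduceDIte]
      simpa [pvProcA] using h1
    · obtain ⟨hlt, hdrop, htake⟩ := pv_find_facts s '\'' hk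
      have hlen_take : (s.take (PySem.Chars.find s ['\'']).toNat).length
          = (PySem.Chars.find s ['\'']).toNat := by
        rw [List.length_take]
        omega
      have hsplit : s = s.take (PySem.Chars.find s ['\'']).toNat
          ++ '\'' :: s.drop ((PySem.Chars.find s ['\'']).toNat + 1) := by
        conv_lhs => rw [← List.take_append_drop (PySem.Chars.find s ['\'']).toNat s]
        rw [hdrop]
      have hstep : pvProcA s true
          = List.replicate (PySem.Chars.find s ['\'']).toNat ' '
            ++ pvProcA ('\'' :: s.drop ((PySem.Chars.find s ['\'']).toNat + 1)) true := by
        conv_lhs => rw [hsplit]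
        rw [pv_procA_blank _ _ htake, hlen_take]
      by_cases hq : s[(PySem.Chars.find s ['\'']).toNat + 1]? = some '\''
      · have hhd : (s.drop ((PySem.Chars.find s ['\'']).toNat + 1)).head? = some '\'' := by
          rw [List.head?_drop]; exact hq
        obtain ⟨t, ht⟩ := List.head?_eq_some_iff.mp hhd
        have htl : t = s.drop ((PySem.Chars.find s ['\'']).toNat + 2) := by
          have := List.tail_drop (l := s) (i := (PySem.Chars.find s ['\'']).toNat + 1)
          rw [ht] at this
          exact this
        have hih := ih (s.drop ((PySem.Chars.find s ['\'']).toNat + 2))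
          (by simp only [List.length_drop]; omega)
        rw [hstep, ht, htl]
        rw [pvProcA.eq_def]
        simp only [if_pos rfl]
        rw [pvBlankLit]
        simp only [hk, ↓reduceDIte, hq]
        rw [hih]
        simp
      · have hhd : (s.drop ((PySem.Chars.find s ['\'']).toNat + 1)).head? ≠ some '\'' := by
          rw [List.head?_drop]; exact hq
        rw [hstep, pv_procA_quote_close _ hhd]
        rw [pvBlankLit]
        simp only [hk, ↓reduceDIte, hq]
        simp

theorem pv_find_nil (a : Char) : PySem.Chars.find ([] : List Char) [a] = -1 := by
  rw [PySem.Chars.find_eq_neg_one_iff]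
  intro h
  simpa using h.length_le

theorem pv_mem_take_mono {l : List Char} {m k : Nat} (h : m ≤ k) {c : Char}
    (hc : c ∈ l.take m) : c ∈ l.take k := by
  have : l.take m = (l.take k).take m := by rw [List.take_take, Nat.min_eq_left h]
  rw [this] at hc
  exact List.mem_of_mem_take hc

theorem pv_main_aux : ∀ (n : Nat) (ln : List Char), ln.length ≤ n →
    pvProcA ln false = pvProcB ln := by
  intro n
  induction n with
  | zero =>
    intro ln hln
    have : ln = [] := List.eq_nil_of_length_eq_zero (Nat.le_zero.mp hln)
    subst this
    rw [pvProcB.eq_def]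
    simp [pv_find_nil, pvProcA.eq_def]
  | succ n ih =>
    intro ln hln
    rw [pvProcB.eq_def]
    simp only
    split
    · -- inline comment first
      rename_i h1
      obtain ⟨hc, hq0⟩ := h1
      obtain ⟨hclt, hcdrop, hctake⟩ := pv_find_facts ln '"' hc
      have hp : ∀ ch ∈ ln.take (PySem.Chars.find ln ['"']).toNat, ch ≠ '\'' ∧ ch ≠ '"' := by
        intro ch hch
        refine ⟨?_, hctake ch hch⟩
        rcases hq0 with hq | hlt
        · exact pv_find_none ln '\'' hq ch (List.mem_of_mem_take hch)
        · have hq : ¬ PySem.Chars.find ln ['\''] = -1 := by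
            have := PySem.Chars.neg_one_le_find ln ['"']
            omega
          obtain ⟨_, _, hqtake⟩ := pv_find_facts ln '\'' hq
          have hmn : (PySem.Chars.find ln ['"']).toNat ≤ (PySem.Chars.find ln ['\'']).toNat := by
            have := PySem.Chars.neg_one_le_find ln ['"']
            omega
          exact hqtake ch (pv_mem_take_mono hmn hch)
      have hsplit : ln = ln.take (PySem.Chars.find ln ['"']).toNat
          ++ '"' :: ln.drop ((PySem.Chars.find ln ['"']).toNat + 1) := by
        conv_lhs => rw [← List.take_append_drop (PySem.Chars.find ln ['"']).toNat ln]
        rw [hcdrop]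
      conv_lhs => rw [hsplit]
      rw [pv_procA_copy _ _ hp, pvProcA.eq_def]
      simp only [List.length_drop]
      norm_num
      rw [if_neg (by decide)]
      congr 1
      omega
    · -- not a comment first
     rename_i hnc
     split
     · -- string literal first
      rename_i hq
      obtain ⟨hqlt, hqdrop, hqtake⟩ := pv_find_facts ln '\'' hq
      have hpd : ∀ ch ∈ ln.take (PySem.Chars.find ln ['\'']).toNat, ch ≠ '"' := by
        by_cases hc : PySem.Chars.find ln ['"'] = -1
        · exact fun ch hch => pv_find_none ln '"' hc ch (List.mem_of_mem_take hch)
        · obtain ⟨hclt, hcdrop, hctake⟩ := pv_find_facts ln '"' hc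
          have hne : PySem.Chars.find ln ['\''] ≠ PySem.Chars.find ln ['"'] := by
            intro heq
            rw [heq] at hqdrop
            rw [hqdrop] at hcdrop
            simp at hcdrop
          have hlt : PySem.Chars.find ln ['\''] < PySem.Chars.find ln ['"'] := by
            have h1 : ¬ PySem.Chars.find ln ['"'] < PySem.Chars.find ln ['\''] := by
              intro hlt'
              exact hnc ⟨hc, Or.inr hlt'⟩
            omega
          have hmn : (PySem.Chars.find ln ['\'']).toNat ≤ (PySem.Chars.find ln ['"']).toNat := by
            have := PySem.Chars.neg_one_le_find ln ['\'']
            omega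
          exact fun ch hch => hctake ch (pv_mem_take_mono hmn hch)
      have hp : ∀ ch ∈ ln.take (PySem.Chars.find ln ['\'']).toNat, ch ≠ '\'' ∧ ch ≠ '"' :=
        fun ch hch => ⟨hqtake ch hch, hpd ch hch⟩
      have hsplit : ln = ln.take (PySem.Chars.find ln ['\'']).toNat
          ++ '\'' :: ln.drop ((PySem.Chars.find ln ['\'']).toNat + 1) := by
        conv_lhs => rw [← List.take_append_drop (PySem.Chars.find ln ['\'']).toNat ln]
        rw [hqdrop]
      have hbl := pv_procA_blankLit (ln.drop ((PySem.Chars.find ln ['\'']).toNat + 1)).length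
        (ln.drop ((PySem.Chars.find ln ['\'']).toNat + 1)) le_rfl
      have hihlen : (pvBlankLit (ln.drop ((PySem.Chars.find ln ['\'']).toNat + 1))).1.length ≤ n := by
        have h1 := pvBlankLit_fst_len (ln.drop ((PySem.Chars.find ln ['\'']).toNat + 1))
        simp only [List.length_drop] at h1
        omega
      have hih := ih _ hihlen
      have htake1 : ln.take ((PySem.Chars.find ln ['\'']).toNat + 1)
          = ln.take (PySem.Chars.find ln ['\'']).toNat ++ ['\''] := by
        rw [List.take_succ_eq_append_getElem hqlt]
        congr 2
        have h1 := List.head?_drop (l := ln) (i := (PySem.Chars.find ln ['\'']).toNat)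
        rw [hqdrop] at h1
        simp only [List.head?_cons] at h1
        have := List.getElem?_eq_getElem (l := ln) (i := (PySem.Chars.find ln ['\'']).toNat) hqlt
        rw [this] at h1
        exact (Option.some_injective _ h1.symm)
      conv_lhs => rw [hsplit]
      rw [pv_procA_copy _ _ hp, pvProcA.eq_def]
      simp only
      rw [hbl, hih, htake1]
      simp
     · -- neither a quote nor a comment sign anywhere
      rename_i hqn
      have hq : PySem.Chars.find ln ['\''] = -1 := by
        by_contra h
        exact hqn h
      have hc : PySem.Chars.find ln ['"'] = -1 := by
        by_contra h
        exact hnc ⟨h, Or.inl hq⟩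
      have hp : ∀ ch ∈ ln, ch ≠ '\'' ∧ ch ≠ '"' :=
        fun ch hch => ⟨pv_find_none ln '\'' hq ch hch, pv_find_none ln '"' hc ch hch⟩
      have h2 := pv_procA_copy ln [] (fun ch hch => hp ch hch)
      rw [List.append_nil] at h2
      rw [h2, pvProcA.eq_def]
      simp

theorem pv_main (ln : List Char) : pvProcA ln false = pvProcB ln :=
  pv_main_aux ln.length ln le_rfl

-- ===== VERDICT (by name: the statement is the Claim_ definition above) =====
theorem rm_strings_and_comments_spec : Claim_equal_rm_strings_and_comments := by
  intro src _
  unfold Spec_rm_strings_and_comments rm_strings_and_comments rm_strings_and_comments_alt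
  congr 1
  apply congrArg
  apply List.map_congr_left
  intro ln _
  unfold pvLineA pvLineB
  split
  · rfl
  · exact pv_main ln
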